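-- pv_equiv track=rewrite | github.com/zty123456/modeling | python/zrt/graph/graph_exporter.py | _module_path_to_scope
-- ===== SOURCE A (Python) =====
-- from typing import Any, Dict, List, Optional
--
-- def _module_path_to_scope(module_path: str) -> str:
--     """Convert ``model.layers.0.self_attn.q_a_proj`` to
--     ``model/layers.0/self_attn/q_a_proj`` for Netron grouping.
--
--     Keeps container+index pairs together (``layers.0``, ``experts.3``)
--     as a single scope level for readability.
--     """
--     if not module_path:
--         return ""
--     parts = module_path.split(".")
--     scope_parts: List[str] = []
--     _CONTAINERS = {"layers", "blocks", "h", "layer", "experts"}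
--     i = 0
--     while i < len(parts):
--         p = parts[i]
--         if p in _CONTAINERS and i + 1 < len(parts):
--             try:
--                 int(parts[i + 1])
--                 scope_parts.append(f"{p}.{parts[i + 1]}")
--                 i += 2
--                 continue
--             except ValueError:
--                 pass
--         scope_parts.append(p)
--         i += 1
--     return "/".join(scope_parts)
-- ===== SOURCE B (Python) =====
-- from typing import List
--
-- def _module_path_to_scope(module_path: str) -> str:
--     """Convert ``model.layers.0.self_attn.q_a_proj`` to
--     ``model/layers.0/self_attn/q_a_proj`` for Netron grouping.
--
--     Single pass with look-behind: append each token; when a token parses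
--     as an int and the previous emitted scope part is a bare container
--     name, merge it into that part instead.
--     """
--     if not module_path:
--         return ""
--     _CONTAINERS = {"layers", "blocks", "h", "layer", "experts"}
--     scope_parts: List[str] = []
--     for token in module_path.split("."):
--         merged = False
--         if scope_parts:
--             last = scope_parts[-1]
--             if last in _CONTAINERS:
--                 try:
--                     int(token)
--                     scope_parts[-1] = f"{last}.{token}"
--                     merged = True
--                 except ValueError:
--                     pass
--         if not merged:
--             scope_parts.append(token)
--     return "/".join(scope_parts)
-- ===== Notes on version B (the rewrite author's own statement) =====
-- stated objective: alternative
-- what changed: Replaces the index-based while loop with one-step integer lookahead by a single fold over the tokens that merges an integer token into the accumulator's last element when it is a bare container name (look-behind instead of lookahead).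
import Mathlib
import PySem

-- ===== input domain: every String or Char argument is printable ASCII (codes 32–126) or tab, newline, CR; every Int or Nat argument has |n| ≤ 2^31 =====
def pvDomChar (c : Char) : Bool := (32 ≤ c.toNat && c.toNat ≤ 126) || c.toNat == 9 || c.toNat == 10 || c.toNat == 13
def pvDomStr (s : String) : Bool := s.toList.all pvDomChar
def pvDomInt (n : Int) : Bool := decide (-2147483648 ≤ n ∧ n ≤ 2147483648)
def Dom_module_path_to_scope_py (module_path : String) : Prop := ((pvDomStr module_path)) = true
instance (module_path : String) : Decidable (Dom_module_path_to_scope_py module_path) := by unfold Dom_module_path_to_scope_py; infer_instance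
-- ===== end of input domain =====

-- B folds once over the tokens with a look-behind merge into the accumulator's last
-- element, instead of A's index loop with one-step integer lookahead; same cost.

-- ===== PORT A =====
-- _CONTAINERS = {"layers", "blocks", "h", "layer", "experts"}
def pvContainersA : PySem.Set String :=
  PySem.Set.ofList ["layers", "blocks", "h", "layer", "experts"]

-- A's while loop over parts with index i: 'parts[i]' / 'parts[i+1]' are the first
-- one or two elements of the remaining suffix; 'i += 2' / 'i += 1' drop them
def pvLoopA : List String → List String
  | [] => []
  | [p] => [p]
  | p :: q :: rest =>
    if PySem.Set.contains pvContainersA p && (PySem.Int.ofStr? q).isSome then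
      (p ++ "." ++ q) :: pvLoopA rest
    else
      p :: pvLoopA (q :: rest)

def module_path_to_scope_py (module_path : String) : String :=
  if module_path == "" then ""
  else
    -- module_path.split("."): sep ≠ "" so split? is always some
    PySem.Str.join "/" (pvLoopA ((PySem.Str.split? module_path ".").getD []))

-- ===== PORT B =====
def pvContainersB : PySem.Set String :=
  PySem.Set.ofList ["layers", "blocks", "h", "layer", "experts"]

-- one iteration of Source B's for-loop: merge into scope_parts[-1], else append
def pvStepB (acc : List String) (tok : String) : List String :=
  match acc.getLast? with
  | some last =>
    if PySem.Set.contains pvContainersB last && (PySem.Int.ofStr? tok).isSome then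
      acc.dropLast ++ [last ++ "." ++ tok]
    else
      acc ++ [tok]
  | none => acc ++ [tok]

def module_path_to_scope_py_alt (module_path : String) : String :=
  if module_path == "" then ""
  else
    -- module_path.split("."): sep ≠ "" so split? is always some
    PySem.Str.join "/" (((PySem.Str.split? module_path ".").getD []).foldl pvStepB [])

-- ===== PRECONDITION & SPEC =====
def Spec_module_path_to_scope_py (module_path : String) (out : String) : Prop := out = module_path_to_scope_py_alt module_path
instance (module_path : String) (out : String) : Decidable (Spec_module_path_to_scope_py module_path out) := by unfold Spec_module_path_to_scope_py; infer_instance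

-- ===== CLAIM (what is proved, stated in full; the proofs are below) =====
def Claim_equal_module_path_to_scope_py : Prop := ∀ (module_path : String), Dom_module_path_to_scope_py module_path → Spec_module_path_to_scope_py module_path (module_path_to_scope_py module_path)

-- ===== LEMMAS AND PROOFS =====

-- a merged part "c.q" is never itself a bare container name (no container has a '.')
theorem pv_merged_not_container (p q : String) :
    PySem.Set.contains pvContainersA (p ++ "." ++ q) = false := by
  cases hc : PySem.Set.contains pvContainersA (p ++ "." ++ q) with
  | false => rfl
  | true =>
    exfalso
    have hmem' : (p ++ "." ++ q) ∈ pvContainersA := (PySem.Set.contains_iff _ _).mp hc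
    have hdot : ∀ s ∈ pvContainersA, '.' ∉ s.toList := by decide
    apply hdot _ hmem'
    have h : (p ++ "." ++ q).toList = p.toList ++ '.' :: q.toList := by simp
    rw [h]
    simp

-- the two set literals are the same term
theorem pv_containers_eq : pvContainersB = pvContainersA := rfl

-- unfolding equation for pvLoopA on a two-element-or-more list
theorem pvLoopA_cons₂ (p q : String) (rest : List String) :
    pvLoopA (p :: q :: rest) =
      if PySem.Set.contains pvContainersA p && (PySem.Int.ofStr? q).isSome then
        (p ++ "." ++ q) :: pvLoopA rest
      else
        p :: pvLoopA (q :: rest) := by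
  rw [pvLoopA]

-- key invariant: once token q has been appended to the accumulator, B's fold over
-- the remaining tokens computes A's loop on the suffix q :: parts
theorem pv_foldl_stepB (parts : List String) :
    ∀ (q : String) (acc : List String),
      parts.foldl pvStepB (acc ++ [q]) = acc ++ pvLoopA (q :: parts) := by
  induction parts with
  | nil =>
    intro q acc
    simp only [List.foldl, pvLoopA]
  | cons p rest ih =>
    intro q acc
    have hstep : pvStepB (acc ++ [q]) p =
        if PySem.Set.contains pvContainersA q && (PySem.Int.ofStr? p).isSome then
          acc ++ [q ++ "." ++ p]
        else (acc ++ [q]) ++ [p] := by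
      unfold pvStepB
      rw [List.getLast?_concat, List.dropLast_concat, pv_containers_eq]
    simp only [List.foldl]
    rw [hstep, pvLoopA_cons₂]
    by_cases hq : (PySem.Set.contains pvContainersA q && (PySem.Int.ofStr? p).isSome) = true
    · rw [if_pos hq, if_pos hq]
      cases rest with
      | nil => simp only [List.foldl, pvLoopA]
      | cons r rs =>
        rw [ih (q ++ "." ++ p) acc, pvLoopA_cons₂, pv_merged_not_container]
        simp
    · rw [if_neg hq, if_neg hq, ih p (acc ++ [q])]
      simp

-- B's fold equals A's loop on the full token list
theorem pv_fold_eq_loop (parts : List String) :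
    parts.foldl pvStepB [] = pvLoopA parts := by
  cases parts with
  | nil => rfl
  | cons t ts =>
    have h0 : pvStepB [] t = [t] := rfl
    simp only [List.foldl, h0]
    simpa using pv_foldl_stepB ts t []

-- ===== VERDICT (by name: the statement is the Claim_ definition above) =====
theorem module_path_to_scope_py_spec : Claim_equal_module_path_to_scope_py := by
  intro module_path _
  unfold Spec_module_path_to_scope_py module_path_to_scope_py module_path_to_scope_py_alt
  rw [pv_fold_eq_loop]
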